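-- pv_equiv track=rewrite | github.com/antiwong/midterm-stock-planner | src/analytics/factor_exposure.py | _get_default_factor_definitions
-- ===== SOURCE A (Python) =====
-- from typing import Dict, List, Optional, Any
--
-- def _get_default_factor_definitions(available_features: List[str]) -> Dict[str, List[str]]:
--     """Get default factor definitions based on available features."""
--     definitions = {}
--
--     # Market factor (beta proxy)
--     if 'beta' in available_features:
--         definitions['market'] = ['beta']
--
--     # Size factor
--     size_features = [f for f in available_features if 'market_cap' in f.lower() or 'size' in f.lower()]
--     if size_features:
--         definitions['size'] = size_features
--
--     # Value factor
--     value_features = [f for f in available_features if any(v in f.lower() for v in ['pe', 'pb', 'value', 'book'])]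
--     if value_features:
--         definitions['value'] = value_features
--
--     # Momentum factor
--     momentum_features = [f for f in available_features if any(m in f.lower() for m in ['momentum', 'return', 'rsi'])]
--     if momentum_features:
--         definitions['momentum'] = momentum_features
--
--     # Quality factor
--     quality_features = [f for f in available_features if any(q in f.lower() for q in ['roe', 'margin', 'quality', 'profit'])]
--     if quality_features:
--         definitions['quality'] = quality_features
--
--     # Low volatility factor
--     vol_features = [f for f in available_features if any(v in f.lower() for v in ['vol', 'volatility', 'std'])]
--     if vol_features:
--         definitions['low_vol'] = vol_features
--
--     return definitions
-- ===== SOURCE B (Python) =====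
-- # Single pass over available_features with one accumulator per factor group,
-- # then assemble the fixed-order table and keep the non-empty groups.
-- def _get_default_factor_definitions(available_features):
--     has_beta = False
--     size, value, momentum, quality, low_vol = [], [], [], [], []
--     for f in available_features:
--         if f == 'beta':
--             has_beta = True
--         fl = f.lower()
--         if 'market_cap' in fl or 'size' in fl:
--             size.append(f)
--         if any(v in fl for v in ('pe', 'pb', 'value', 'book')):
--             value.append(f)
--         if any(m in fl for m in ('momentum', 'return', 'rsi')):
--             momentum.append(f)
--         if any(q in fl for q in ('roe', 'margin', 'quality', 'profit')):
--             quality.append(f)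
--         if any(v in fl for v in ('vol', 'volatility', 'std')):
--             low_vol.append(f)
--     pairs = [('market', ['beta'] if has_beta else []),
--              ('size', size), ('value', value), ('momentum', momentum),
--              ('quality', quality), ('low_vol', low_vol)]
--     return {k: v for k, v in pairs if v}
-- ===== Notes on version B (the rewrite author's own statement) =====
-- stated objective: alternative
-- what changed: A makes six independent passes over available_features (one membership test plus five list comprehensions) and builds a dict by conditional inserts; B makes a single pass with one accumulator per factor group plus a beta flag, then assembles the fixed-order pair table and keeps the non-empty groups.
import Mathlib
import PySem

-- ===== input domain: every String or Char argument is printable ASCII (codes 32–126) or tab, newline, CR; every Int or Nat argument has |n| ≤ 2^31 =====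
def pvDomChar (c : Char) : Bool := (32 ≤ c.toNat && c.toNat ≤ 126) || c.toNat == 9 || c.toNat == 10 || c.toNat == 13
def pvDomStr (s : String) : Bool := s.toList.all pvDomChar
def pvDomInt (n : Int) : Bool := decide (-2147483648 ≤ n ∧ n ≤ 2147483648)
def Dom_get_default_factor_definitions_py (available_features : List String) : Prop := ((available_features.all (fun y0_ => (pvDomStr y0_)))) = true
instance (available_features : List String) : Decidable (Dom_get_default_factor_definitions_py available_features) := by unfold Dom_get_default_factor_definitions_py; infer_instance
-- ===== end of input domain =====

-- B replaces A's six separate passes over the feature list by a single pass with one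
-- accumulator per factor group (objective: alternative decomposition, same output).

-- ===== PORT A =====
-- literal transliteration of A: a dict built by conditional fresh-key inserts from six
-- list comprehensions, returned as its items (insertion order)
def get_default_factor_definitions_py (available_features : List String) : List (String × List String) :=
  let definitions : PySem.Dict String (List String) := PySem.Dict.empty
  let definitions := if available_features.contains "beta" then definitions.insert "market" ["beta"] else definitions
  let size_features := available_features.filter (fun f => PySem.Str.isIn "market_cap" (PySem.Str.lower f) || PySem.Str.isIn "size" (PySem.Str.lower f))
  let definitions := if size_features = [] then definitions else definitions.insert "size" size_features
  let value_features := available_features.filter (fun f => (["pe", "pb", "value", "book"].any (fun v => PySem.Str.isIn v (PySem.Str.lower f))))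
  let definitions := if value_features = [] then definitions else definitions.insert "value" value_features
  let momentum_features := available_features.filter (fun f => (["momentum", "return", "rsi"].any (fun m => PySem.Str.isIn m (PySem.Str.lower f))))
  let definitions := if momentum_features = [] then definitions else definitions.insert "momentum" momentum_features
  let quality_features := available_features.filter (fun f => (["roe", "margin", "quality", "profit"].any (fun q => PySem.Str.isIn q (PySem.Str.lower f))))
  let definitions := if quality_features = [] then definitions else definitions.insert "quality" quality_features
  let vol_features := available_features.filter (fun f => (["vol", "volatility", "std"].any (fun v => PySem.Str.isIn v (PySem.Str.lower f))))
  let definitions := if vol_features = [] then definitions else definitions.insert "low_vol" vol_features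
  definitions.items

-- ===== PORT B =====
-- one loop step of B: update the beta flag and append f to each matching accumulator
def pvStepB (st : Bool × List String × List String × List String × List String × List String)
    (f : String) : Bool × List String × List String × List String × List String × List String :=
  let (hb, sz, va, mo, qu, lv) := st
  let hb := hb || f == "beta"
  let fl := PySem.Str.lower f
  let sz := if PySem.Str.isIn "market_cap" fl || PySem.Str.isIn "size" fl then sz ++ [f] else sz
  let va := if ["pe", "pb", "value", "book"].any (fun v => PySem.Str.isIn v fl) then va ++ [f] else va
  let mo := if ["momentum", "return", "rsi"].any (fun m => PySem.Str.isIn m fl) then mo ++ [f] else mo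
  let qu := if ["roe", "margin", "quality", "profit"].any (fun q => PySem.Str.isIn q fl) then qu ++ [f] else qu
  let lv := if ["vol", "volatility", "std"].any (fun v => PySem.Str.isIn v fl) then lv ++ [f] else lv
  (hb, sz, va, mo, qu, lv)

def get_default_factor_definitions_py_alt (available_features : List String) : List (String × List String) :=
  let st := available_features.foldl pvStepB (false, [], [], [], [], [])
  let (hb, sz, va, mo, qu, lv) := st
  let pairs : List (String × List String) :=
    [("market", if hb then ["beta"] else []), ("size", sz), ("value", va),
     ("momentum", mo), ("quality", qu), ("low_vol", lv)]
  pairs.filter (fun p => !p.2.isEmpty)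

-- ===== PRECONDITION & SPEC =====
def Spec_get_default_factor_definitions_py (available_features : List String) (out : List (String × List String)) : Prop := out = get_default_factor_definitions_py_alt available_features
instance (available_features : List String) (out : List (String × List String)) : Decidable (Spec_get_default_factor_definitions_py available_features out) := by unfold Spec_get_default_factor_definitions_py; infer_instance

-- ===== CLAIM (what is proved, stated in full; the proofs are below) =====
def Claim_equal_get_default_factor_definitions_py : Prop := ∀ (available_features : List String), Dom_get_default_factor_definitions_py available_features → Spec_get_default_factor_definitions_py available_features (get_default_factor_definitions_py available_features)

-- ===== LEMMAS AND PROOFS =====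

theorem pvFoldB_spec (av : List String)
    (hb : Bool) (sz va mo qu lv : List String) :
    av.foldl pvStepB (hb, sz, va, mo, qu, lv) =
      (hb || av.contains "beta",
       sz ++ av.filter (fun f => PySem.Str.isIn "market_cap" (PySem.Str.lower f) || PySem.Str.isIn "size" (PySem.Str.lower f)),
       va ++ av.filter (fun f => ["pe", "pb", "value", "book"].any (fun v => PySem.Str.isIn v (PySem.Str.lower f))),
       mo ++ av.filter (fun f => ["momentum", "return", "rsi"].any (fun m => PySem.Str.isIn m (PySem.Str.lower f))),
       qu ++ av.filter (fun f => ["roe", "margin", "quality", "profit"].any (fun q => PySem.Str.isIn q (PySem.Str.lower f))),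
       lv ++ av.filter (fun f => ["vol", "volatility", "std"].any (fun v => PySem.Str.isIn v (PySem.Str.lower f)))) := by
  induction av generalizing hb sz va mo qu lv with
  | nil => simp
  | cons f t ih =>
    simp only [List.foldl_cons, pvStepB, List.filter_cons, List.contains_cons]
    rw [ih]
    split_ifs <;> simp [Bool.or_assoc, BEq.comm]

-- ===== VERDICT (by name: the statement is the Claim_ definition above) =====
theorem pvChainA_items (b : Bool) (v2 v3 v4 v5 v6 : List String) :
    (let d0 : PySem.Dict String (List String) := PySem.Dict.empty
     let d1 := if b then d0.insert "market" ["beta"] else d0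
     let d2 := if v2 = [] then d1 else d1.insert "size" v2
     let d3 := if v3 = [] then d2 else d2.insert "value" v3
     let d4 := if v4 = [] then d3 else d3.insert "momentum" v4
     let d5 := if v5 = [] then d4 else d4.insert "quality" v5
     let d6 := if v6 = [] then d5 else d5.insert "low_vol" v6
     d6.items) =
    (if b then [("market", ["beta"])] else []) ++
    (if v2 = [] then [] else [("size", v2)]) ++
    (if v3 = [] then [] else [("value", v3)]) ++
    (if v4 = [] then [] else [("momentum", v4)]) ++
    (if v5 = [] then [] else [("quality", v5)]) ++
    (if v6 = [] then [] else [("low_vol", v6)]) := by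
  cases b <;>
  by_cases h2 : v2 = [] <;>
  by_cases h3 : v3 = [] <;>
  by_cases h4 : v4 = [] <;>
  by_cases h5 : v5 = [] <;>
  by_cases h6 : v6 = [] <;>
  simp [h2, h3, h4, h5, h6, PySem.Dict.items_insert, PySem.Dict.contains_insert,
    PySem.Dict.empty, PySem.Dict.items, PySem.Dict.contains_empty]

theorem pvPairsB_filter (hb : Bool) (v2 v3 v4 v5 v6 : List String) :
    List.filter (fun p => !p.2.isEmpty)
      [("market", if hb then ["beta"] else []), ("size", v2), ("value", v3),
       ("momentum", v4), ("quality", v5), ("low_vol", v6)] =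
    (if hb then [("market", ["beta"])] else []) ++
    (if v2 = [] then [] else [("size", v2)]) ++
    (if v3 = [] then [] else [("value", v3)]) ++
    (if v4 = [] then [] else [("momentum", v4)]) ++
    (if v5 = [] then [] else [("quality", v5)]) ++
    (if v6 = [] then [] else [("low_vol", v6)]) := by
  cases hb <;>
  by_cases h2 : v2 = [] <;>
  by_cases h3 : v3 = [] <;>
  by_cases h4 : v4 = [] <;>
  by_cases h5 : v5 = [] <;>
  by_cases h6 : v6 = [] <;>
  simp [h2, h3, h4, h5, h6, List.filter_cons, List.isEmpty_iff, List.isEmpty_eq_false_iff]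

theorem get_default_factor_definitions_py_spec : Claim_equal_get_default_factor_definitions_py := by
  intro av _
  show get_default_factor_definitions_py av = get_default_factor_definitions_py_alt av
  unfold get_default_factor_definitions_py get_default_factor_definitions_py_alt
  rw [pvFoldB_spec]
  simp only [Bool.false_or, List.nil_append]
  rw [pvChainA_items, pvPairsB_filter]
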